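-- pv_equiv track=rewrite | github.com/varbaran/2048-game | utils/board.py | check_similar_numbers
-- ===== SOURCE A (Python) =====
-- def check_similar_numbers(board):
--     directions = [(-1, 0), (1, 0), (0, -1), (0, 1)]
--     for i in range(len(board)):
--         for j in range(len(board[i])):
--             for direction in directions:
--                 if 0 <= direction[0] + i < len(board) and 0 <= direction[1] + j < len(board[i]):
--                     if board[i][j] == board[i + direction[0]][j + direction[1]]:
--                         return True
--     return False
-- ===== SOURCE B (Python) =====
-- def check_similar_numbers(board):
--     # horizontal pass: each adjacency in a row, checked once
--     for row in board:
--         for a, b in zip(row, row[1:]):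
--             if a == b:
--                 return True
--     # vertical pass: adjacent rows, element-wise
--     for r1, r2 in zip(board, board[1:]):
--         for a, b in zip(r1, r2):
--             if a == b:
--                 return True
--     return False
-- ===== Notes on version B (the rewrite author's own statement) =====
-- stated objective: simpler
-- what changed: Replaces the triple loop over a 4-direction offset list with explicit index-bound arithmetic by two zip-based passes (row with its shift for horizontal pairs, adjacent rows element-wise for vertical pairs), checking each adjacency once instead of twice.
import Mathlib
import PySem

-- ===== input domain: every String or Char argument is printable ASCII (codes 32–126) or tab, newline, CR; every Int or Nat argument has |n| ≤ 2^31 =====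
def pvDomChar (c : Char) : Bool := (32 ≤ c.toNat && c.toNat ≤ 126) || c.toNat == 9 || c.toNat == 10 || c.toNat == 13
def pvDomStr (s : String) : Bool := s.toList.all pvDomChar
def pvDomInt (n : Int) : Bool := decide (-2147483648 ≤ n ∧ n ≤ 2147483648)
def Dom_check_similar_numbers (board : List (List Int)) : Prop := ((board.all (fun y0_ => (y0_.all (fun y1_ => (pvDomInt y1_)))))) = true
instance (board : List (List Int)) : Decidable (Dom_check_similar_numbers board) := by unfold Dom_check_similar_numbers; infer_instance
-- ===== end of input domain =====

-- B replaces the offset-list triple loop by two zip-based passes (horizontal, then vertical),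
-- checking each adjacency once; objective: simpler.


-- ===== PORT A =====
-- Literal port of A's triple loop. The element default 4294967296 (outside Dom, so it can
-- never equal a cell) is reached exactly where the Python indexing raises IndexError
-- (the neighbouring row of a ragged board is shorter); those inputs are excluded by Pre_.
def check_similar_numbers (board : List (List Int)) : Bool :=
  let directions : List (Int × Int) := [(-1, 0), (1, 0), (0, -1), (0, 1)]
  (PySem.List.pyRange 0 (board.length : Int) 1).any (fun i =>
    (PySem.List.pyRange 0 ((PySem.List.pyGetD board i []).length : Int) 1).any (fun j =>
      directions.any (fun d =>
        (decide (0 ≤ d.1 + i) && decide (d.1 + i < (board.length : Int)) &&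
         decide (0 ≤ d.2 + j) && decide (d.2 + j < ((PySem.List.pyGetD board i []).length : Int))) &&
        (PySem.List.pyGetD (PySem.List.pyGetD board i []) j 0 ==
         PySem.List.pyGetD (PySem.List.pyGetD board (i + d.1) []) (j + d.2) 4294967296))))

-- ===== PORT B =====
def check_similar_numbers_alt (board : List (List Int)) : Bool :=
  (board.any (fun row => (row.zip row.tail).any (fun p => p.1 == p.2))) ||
  ((board.zip board.tail).any (fun rp => (rp.1.zip rp.2).any (fun p => p.1 == p.2)))

-- ===== PRECONDITION & SPEC =====
-- helpers for stating Pre_: row length, cell value, A's scan-order comparison of check positions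
def rowLenB (board : List (List Int)) (i : Nat) : Nat := (board.getD i []).length
def cellB (board : List (List Int)) (i j : Nat) : Int := (board.getD i []).getD j 0
def keyLtB (i j t i' j' t' : Nat) : Bool :=
  decide (i < i') || (decide (i = i') && (decide (j < j') || (decide (j = j') && decide (t < t'))))
-- an equal in-bounds pair found by A's check at position (i, j), direction index t
def matchB (board : List (List Int)) (i j t : Nat) : Bool :=
  (decide (t = 0) && decide (1 ≤ i) && decide (j < rowLenB board (i - 1)) && decide (cellB board i j = cellB board (i - 1) j)) ||
  (decide (t = 1) && decide (i + 1 < board.length) && decide (j < rowLenB board (i + 1)) && decide (cellB board i j = cellB board (i + 1) j)) ||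
  (decide (t = 2) && decide (1 ≤ j) && decide (cellB board i j = cellB board i (j - 1))) ||
  (decide (t = 3) && decide (j + 1 < rowLenB board i) && decide (cellB board i j = cellB board i (j + 1)))

-- Pre_ is exactly the inputs on which the Python A returns: either no row is longer than an
-- adjacent row (so no vertical bounds check can overrun, e.g. any rectangular board), or A's
-- row-major scan finds an equal adjacent pair strictly before its first overrunning access.
def Pre_check_similar_numbers (board : List (List Int)) : Prop :=
  (∀ i < board.length,
      (1 ≤ i → rowLenB board i ≤ rowLenB board (i - 1)) ∧
      (i + 1 < board.length → rowLenB board i ≤ rowLenB board (i + 1))) ∨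
  (∃ i < board.length, ∃ j < rowLenB board i, ∃ t < 4, matchB board i j t = true ∧
    ∀ i' < board.length,
      ((1 ≤ i' ∧ rowLenB board (i' - 1) < rowLenB board i') → keyLtB i j t i' (rowLenB board (i' - 1)) 0 = true) ∧
      ((i' + 1 < board.length ∧ rowLenB board (i' + 1) < rowLenB board i') → keyLtB i j t i' (rowLenB board (i' + 1)) 1 = true))
instance (board : List (List Int)) : Decidable (Pre_check_similar_numbers board) := by
  unfold Pre_check_similar_numbers keyLtB matchB rowLenB cellB; infer_instance

def pvWitness_check_similar_numbers : List (List Int) := [[1, 2], [3, 1]]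

def Spec_check_similar_numbers (board : List (List Int)) (out : Bool) : Prop := out = check_similar_numbers_alt board
instance (board : List (List Int)) (out : Bool) : Decidable (Spec_check_similar_numbers board out) := by unfold Spec_check_similar_numbers; infer_instance

-- ===== CLAIM (what is proved, stated in full; the proofs are below) =====
def Claim_equal_check_similar_numbers : Prop := ∀ (board : List (List Int)), Dom_check_similar_numbers board → Pre_check_similar_numbers board → Spec_check_similar_numbers board (check_similar_numbers board)
-- ===== LEMMAS AND PROOFS =====

-- existence over a list as existence over an index (default-valued lookup)
theorem ex_mem_iff_idx {α : Type} (l : List α) (d : α) (P : α → Prop) :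
    (∃ x ∈ l, P x) ↔ ∃ i : Nat, i < l.length ∧ P (l.getD i d) := by
  constructor
  · rintro ⟨x, hx, hP⟩
    obtain ⟨i, hi, rfl⟩ := List.mem_iff_getElem.1 hx
    exact ⟨i, hi, by rwa [List.getD_eq_getElem l d hi]⟩
  · rintro ⟨i, hi, hP⟩
    exact ⟨l.getD i d, by rw [List.getD_eq_getElem l d hi]; exact List.getElem_mem hi, hP⟩

-- existence over a zip as existence over an index
theorem ex_zip_iff_idx {α β : Type} (a : List α) (b : List β) (da : α) (db : β)
    (P : α × β → Prop) :
    (∃ p ∈ a.zip b, P p) ↔ ∃ k : Nat, k < a.length ∧ k < b.length ∧ P (a.getD k da, b.getD k db) := by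
  constructor
  · rintro ⟨p, hp, hP⟩
    obtain ⟨k, hk, rfl⟩ := List.mem_iff_getElem.1 hp
    have hk' := hk; simp only [List.length_zip, lt_min_iff] at hk'
    refine ⟨k, hk'.1, hk'.2, ?_⟩
    rw [List.getD_eq_getElem a da hk'.1, List.getD_eq_getElem b db hk'.2]
    rwa [List.getElem_zip] at hP
  · rintro ⟨k, hka, hkb, hP⟩
    have hk : k < (a.zip b).length := by simp [List.length_zip]; omega
    refine ⟨(a.zip b)[k], List.getElem_mem hk, ?_⟩
    rw [List.getElem_zip]
    rwa [List.getD_eq_getElem a da hka, List.getD_eq_getElem b db hkb] at hP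

theorem tail_getD {α : Type} (l : List α) (k : Nat) (d : α) :
    l.tail.getD k d = l.getD (k + 1) d := by
  cases l <;> rfl

-- the default of an in-range lookup is irrelevant
theorem getD_irrel {α : Type} (l : List α) {k : Nat} (h : k < l.length) (d1 d2 : α) :
    l.getD k d1 = l.getD k d2 := by
  rw [List.getD_eq_getElem l d1 h, List.getD_eq_getElem l d2 h]

-- a horizontally adjacent equal pair exists (Nat indices, total via getD)
def adjH (board : List (List Int)) : Prop :=
  ∃ i j : Nat, i < board.length ∧ j + 1 < (board.getD i []).length ∧
    (board.getD i []).getD j 0 = (board.getD i []).getD (j + 1) 0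

-- a vertically adjacent equal pair exists
def adjV (board : List (List Int)) : Prop :=
  ∃ i j : Nat, i + 1 < board.length ∧ j < (board.getD i []).length ∧
    j < (board.getD (i + 1) []).length ∧
    (board.getD i []).getD j 0 = (board.getD (i + 1) []).getD j 0

-- characterisation of B: an adjacent equal pair, horizontal or vertical
theorem alt_iff (board : List (List Int)) :
    check_similar_numbers_alt board = true ↔ adjH board ∨ adjV board := by
  unfold check_similar_numbers_alt adjH adjV
  simp only [Bool.or_eq_true, List.any_eq_true, beq_iff_eq]
  apply or_congr
  · rw [ex_mem_iff_idx board ([] : List Int)]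
    constructor
    · rintro ⟨i, hi, hrow⟩
      rw [ex_zip_iff_idx _ _ (0 : Int) (0 : Int)] at hrow
      obtain ⟨k, h1, h2, he⟩ := hrow
      rw [List.length_tail] at h2
      rw [tail_getD] at he
      exact ⟨i, k, hi, by omega, he⟩
    · rintro ⟨i, j, hi, hj, he⟩
      refine ⟨i, hi, ?_⟩
      rw [ex_zip_iff_idx _ _ (0 : Int) (0 : Int)]
      exact ⟨j, by omega, by rw [List.length_tail]; omega, by rwa [tail_getD]⟩
  · rw [ex_zip_iff_idx board board.tail ([] : List Int) ([] : List Int)]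
    constructor
    · rintro ⟨k, h1, h2, hrow⟩
      rw [List.length_tail] at h2
      rw [tail_getD] at hrow
      rw [ex_zip_iff_idx _ _ (0 : Int) (0 : Int)] at hrow
      obtain ⟨j, hj1, hj2, he⟩ := hrow
      exact ⟨k, j, by omega, hj1, hj2, he⟩
    · rintro ⟨i, j, hi, hj1, hj2, he⟩
      refine ⟨i, by omega, by rw [List.length_tail]; omega, ?_⟩
      rw [tail_getD, ex_zip_iff_idx _ _ (0 : Int) (0 : Int)]
      exact ⟨j, hj1, hj2, he⟩

-- every in-bounds cell of a board in Dom is bounded by 2^31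
theorem cell_dom (board : List (List Int)) (hdom : Dom_check_similar_numbers board)
    {i j : Nat} (hi : i < board.length) (hj : j < (board.getD i []).length) :
    -2147483648 ≤ (board.getD i []).getD j 0 ∧ (board.getD i []).getD j 0 ≤ 2147483648 := by
  unfold Dom_check_similar_numbers at hdom
  simp only [List.all_eq_true, pvDomInt, decide_eq_true_eq] at hdom
  have h1 : board.getD i [] ∈ board := by
    rw [List.getD_eq_getElem board [] hi]; exact List.getElem_mem hi
  have h2 : (board.getD i []).getD j 0 ∈ board.getD i [] := by
    rw [List.getD_eq_getElem _ 0 hj]; exact List.getElem_mem hj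
  exact hdom _ h1 _ h2

-- characterisation of A on Dom (the sentinel default exceeds every Dom cell)
theorem a_iff (board : List (List Int)) (hdom : Dom_check_similar_numbers board) :
    check_similar_numbers board = true ↔ adjH board ∨ adjV board := by
  unfold check_similar_numbers
  simp only [List.any_eq_true, List.any_cons, List.any_nil, PySem.List.mem_pyRange_one,
    Bool.or_eq_true, Bool.and_eq_true, decide_eq_true_eq, beq_iff_eq, Bool.false_eq_true,
    or_false]
  constructor
  · rintro ⟨i, ⟨hi0, hin⟩, j, ⟨hj0, hjm⟩, hcase⟩
    rw [PySem.List.pyGetD_of_nonneg board [] hi0] at hjm hcase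
    rcases hcase with ⟨⟨⟨⟨h1, h2⟩, h3⟩, h4⟩, he⟩ | ⟨⟨⟨⟨h1, h2⟩, h3⟩, h4⟩, he⟩ |
      ⟨⟨⟨⟨h1, h2⟩, h3⟩, h4⟩, he⟩ | ⟨⟨⟨⟨h1, h2⟩, h3⟩, h4⟩, he⟩
    -- (-1, 0) : vertical pair (i-1, i)
    · right
      rw [PySem.List.pyGetD_of_nonneg board [] (by omega : (0:Int) ≤ i + -1)] at he
      rw [PySem.List.pyGetD_of_nonneg _ 0 hj0] at he
      rw [PySem.List.pyGetD_of_nonneg _ 4294967296 (by omega : (0:Int) ≤ j + 0)] at he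
      have hjj : (j + 0).toNat = j.toNat := by omega
      rw [hjj] at he
      have hi1 : (i + -1).toNat + 1 = i.toNat := by omega
      by_cases hlt : j.toNat < (board.getD (i + -1).toNat []).length
      · rw [getD_irrel _ hlt 4294967296 0] at he
        refine ⟨(i + -1).toNat, j.toNat, by omega, hlt, by rw [hi1]; omega, by rw [hi1]; exact he.symm⟩
      · rw [List.getD_eq_default _ 4294967296 (by omega)] at he
        have := cell_dom board hdom (by omega : i.toNat < board.length) (by omega : j.toNat < (board.getD i.toNat []).length)
        omega
    -- (1, 0) : vertical pair (i, i+1)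
    · right
      rw [PySem.List.pyGetD_of_nonneg board [] (by omega : (0:Int) ≤ i + 1)] at he
      rw [PySem.List.pyGetD_of_nonneg _ 0 hj0] at he
      rw [PySem.List.pyGetD_of_nonneg _ 4294967296 (by omega : (0:Int) ≤ j + 0)] at he
      have hjj : (j + 0).toNat = j.toNat := by omega
      rw [hjj] at he
      have hi1 : (i + 1).toNat = i.toNat + 1 := by omega
      rw [hi1] at he
      by_cases hlt : j.toNat < (board.getD (i.toNat + 1) []).length
      · rw [getD_irrel _ hlt 4294967296 0] at he
        exact ⟨i.toNat, j.toNat, by omega, by omega, hlt, he⟩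
      · rw [List.getD_eq_default _ 4294967296 (by omega)] at he
        have := cell_dom board hdom (by omega : i.toNat < board.length) (by omega : j.toNat < (board.getD i.toNat []).length)
        omega
    -- (0, -1) : horizontal pair (j-1, j)
    · left
      rw [PySem.List.pyGetD_of_nonneg board [] (by omega : (0:Int) ≤ i + 0)] at he
      have h0 : (i + 0).toNat = i.toNat := by omega
      rw [h0] at he
      rw [PySem.List.pyGetD_of_nonneg _ 0 hj0,
        PySem.List.pyGetD_of_nonneg _ 4294967296 (by omega : (0:Int) ≤ j + -1)] at he
      have hlt : (j + -1).toNat < (board.getD i.toNat []).length := by omega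
      rw [getD_irrel _ hlt 4294967296 0] at he
      refine ⟨i.toNat, (j + -1).toNat, by omega, by omega, ?_⟩
      have : (j + -1).toNat + 1 = j.toNat := by omega
      rw [this]
      exact he.symm
    -- (0, 1) : horizontal pair (j, j+1)
    · left
      rw [PySem.List.pyGetD_of_nonneg board [] (by omega : (0:Int) ≤ i + 0)] at he
      have h0 : (i + 0).toNat = i.toNat := by omega
      rw [h0] at he
      rw [PySem.List.pyGetD_of_nonneg _ 0 hj0,
        PySem.List.pyGetD_of_nonneg _ 4294967296 (by omega : (0:Int) ≤ j + 1)] at he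
      have hlt : (j + 1).toNat < (board.getD i.toNat []).length := by omega
      rw [getD_irrel _ hlt 4294967296 0] at he
      refine ⟨i.toNat, j.toNat, by omega, by omega, ?_⟩
      have : (j + 1).toNat = j.toNat + 1 := by omega
      rw [this] at he
      exact he
  · rintro (⟨i, j, hi, hj, he⟩ | ⟨i, j, hi, hj1, hj2, he⟩)
    -- horizontal pair found by direction (0, 1)
    · refine ⟨(i : Int), ⟨by omega, by omega⟩, (j : Int), ?_, ?_⟩
      · rw [PySem.List.pyGetD_of_nonneg board [] (by omega)]
        simp only [Int.toNat_natCast]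
        exact ⟨by omega, by omega⟩
      · right; right; right
        rw [PySem.List.pyGetD_of_nonneg board [] (by omega)]
        simp only [Int.toNat_natCast]
        refine ⟨⟨⟨⟨by omega, by omega⟩, by omega⟩, by omega⟩, ?_⟩
        rw [PySem.List.pyGetD_of_nonneg board [] (by omega : (0:Int) ≤ (i:Int) + 0)]
        rw [PySem.List.pyGetD_of_nonneg _ 0 (by omega : (0:Int) ≤ (j:Int))]
        rw [PySem.List.pyGetD_of_nonneg _ 4294967296 (by omega : (0:Int) ≤ (j:Int) + 1)]
        have h0 : ((i : Int) + 0).toNat = i := by omega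
        have h1 : ((j : Int)).toNat = j := by omega
        have h2 : ((j : Int) + 1).toNat = j + 1 := by omega
        rw [h0, h1, h2]
        rw [getD_irrel _ (by omega : j + 1 < (board.getD i []).length) 4294967296 0]
        exact he
    -- vertical pair found by direction (1, 0)
    · refine ⟨(i : Int), ⟨by omega, by omega⟩, (j : Int), ?_, ?_⟩
      · rw [PySem.List.pyGetD_of_nonneg board [] (by omega)]
        simp only [Int.toNat_natCast]
        exact ⟨by omega, by omega⟩
      · right
        left
        rw [PySem.List.pyGetD_of_nonneg board [] (by omega)]
        simp only [Int.toNat_natCast]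
        refine ⟨⟨⟨⟨by omega, by omega⟩, by omega⟩, by omega⟩, ?_⟩
        rw [PySem.List.pyGetD_of_nonneg board [] (by omega : (0:Int) ≤ (i:Int) + 1)]
        rw [PySem.List.pyGetD_of_nonneg _ 0 (by omega : (0:Int) ≤ (j:Int))]
        rw [PySem.List.pyGetD_of_nonneg _ 4294967296 (by omega : (0:Int) ≤ (j:Int) + 0)]
        have h0 : ((i : Int) + 1).toNat = i + 1 := by omega
        have h1 : ((j : Int)).toNat = j := by omega
        have h2 : ((j : Int) + 0).toNat = j := by omega
        rw [h0, h1, h2]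
        rw [getD_irrel _ (by omega : j < (board.getD (i + 1) []).length) 4294967296 0]
        exact he

-- ===== VERDICT (by name: the statement is the Claim_ definition above) =====
theorem check_similar_numbers_spec : Claim_equal_check_similar_numbers := by
  intro board hdom _
  unfold Spec_check_similar_numbers
  rw [Bool.eq_iff_iff, a_iff board hdom, alt_iff board]
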